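-- pv_equiv track=rewrite | github.com/cdccnleo/RQA2025 | production_simulation/src/infrastructure/cache/distributed/distributed_cache_manager.py | _check_strong_consistency
-- ===== SOURCE A (Python) =====
-- from typing import Dict, List, Any, Optional, Set, Tuple
--
-- def _check_strong_consistency(key: str, node_clocks: Dict[str, Dict[str, int]]) -> bool:
--     """检查强一致性"""
--     # 所有节点的向量时钟必须相同
--     if not node_clocks:
--         return True
--
--     first_clock = None
--     for node_id, clock in node_clocks.items():
--         if first_clock is None:
--             first_clock = clock
--         elif clock != first_clock:
--             return False
--     return True
-- ===== SOURCE B (Python) =====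
-- def _check_strong_consistency(key: str, node_clocks: dict) -> bool:
--     """检查强一致性: collect the distinct canonical clock signatures and count them."""
--     signatures = {tuple(sorted(clock.items(), key=lambda kv: kv[0]))
--                   for clock in node_clocks.values()}
--     return len(signatures) <= 1
-- ===== Notes on version B (the rewrite author's own statement) =====
-- stated objective: simpler
-- what changed: Replaces the first_clock-sentinel loop with early return by a one-pass set comprehension of canonical (key-sorted) clock signatures whose cardinality (<= 1) decides consistency.
import Mathlib
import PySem

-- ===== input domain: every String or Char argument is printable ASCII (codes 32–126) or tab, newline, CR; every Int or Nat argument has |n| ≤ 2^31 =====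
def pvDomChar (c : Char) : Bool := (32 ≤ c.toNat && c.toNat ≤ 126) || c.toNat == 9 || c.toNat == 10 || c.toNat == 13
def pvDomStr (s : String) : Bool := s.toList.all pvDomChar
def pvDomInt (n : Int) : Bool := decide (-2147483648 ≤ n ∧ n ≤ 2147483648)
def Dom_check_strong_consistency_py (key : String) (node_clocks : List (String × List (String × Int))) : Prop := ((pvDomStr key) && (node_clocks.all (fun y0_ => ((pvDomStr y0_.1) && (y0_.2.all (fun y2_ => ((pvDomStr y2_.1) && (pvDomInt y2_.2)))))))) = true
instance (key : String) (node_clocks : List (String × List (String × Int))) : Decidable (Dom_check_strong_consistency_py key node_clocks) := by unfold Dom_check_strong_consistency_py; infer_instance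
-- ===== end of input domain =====

-- B replaces A's first_clock-sentinel loop (early return on mismatch) by a one-pass set of
-- canonical (key-sorted) clock signatures whose cardinality decides consistency; objective: simpler.

-- ===== PORT A =====
-- Python dict equality (clock == first_clock): same key set and same value at every key.
def pvDictEq (x y : PySem.Dict String Int) : Bool :=
  PySem.Set.equal x.keys y.keys && x.keys.all (fun k => x.get? k == y.get? k)

-- the 'for node_id, clock in node_clocks.items()' loop after first_clock has been set
def pvLoopA (first : PySem.Dict String Int) : List (String × List (String × Int)) → Bool
  | [] => true
  | (_, c) :: t => if pvDictEq (PySem.Dict.ofList c) first then pvLoopA first t else false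

def check_strong_consistency_py (key : String) (node_clocks : List (String × List (String × Int))) : Bool :=
  -- node_clocks is a Python dict: build it (collapsing duplicate node ids the way dict() does)
  match (PySem.Dict.ofList node_clocks).items with
  | [] => true                                   -- if not node_clocks: return True
  | (_, c) :: t => pvLoopA (PySem.Dict.ofList c) t   -- first iteration sets first_clock

-- ===== PORT B =====
-- tuple(sorted(clock.items(), key=lambda kv: kv[0]))
def pvCanon (c : List (String × Int)) : List (String × Int) :=
  PySem.List.sorted (PySem.Dict.ofList c).items (fun kv => kv.1)

def check_strong_consistency_py_alt (key : String) (node_clocks : List (String × List (String × Int))) : Bool :=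
  decide ((PySem.Set.ofList ((PySem.Dict.ofList node_clocks).values.map pvCanon)).length ≤ 1)

-- ===== PRECONDITION & SPEC =====
def Spec_check_strong_consistency_py (key : String) (node_clocks : List (String × List (String × Int))) (out : Bool) : Prop := out = check_strong_consistency_py_alt key node_clocks
instance (key : String) (node_clocks : List (String × List (String × Int))) (out : Bool) : Decidable (Spec_check_strong_consistency_py key node_clocks out) := by unfold Spec_check_strong_consistency_py; infer_instance

-- ===== CLAIM (what is proved, stated in full; the proofs are below) =====
def Claim_equal_check_strong_consistency_py : Prop := ∀ (key : String) (node_clocks : List (String × List (String × Int))), Dom_check_strong_consistency_py key node_clocks → Spec_check_strong_consistency_py key node_clocks (check_strong_consistency_py key node_clocks)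

-- ===== LEMMAS AND PROOFS =====

-- A's early-return loop is an 'all' over the remaining nodes.
theorem pvLoopA_eq_all (first : PySem.Dict String Int) (t : List (String × List (String × Int))) :
    pvLoopA first t = t.all (fun q => pvDictEq (PySem.Dict.ofList q.2) first) := by
  induction t with
  | nil => rfl
  | cons p t ih =>
    obtain ⟨n, c⟩ := p
    simp only [pvLoopA, List.all_cons, ih]
    by_cases h : pvDictEq (PySem.Dict.ofList c) first = true <;> simp [h]

-- Python dict equality of two Nodup-key dicts is permutation of their item lists.
theorem pvDictEq_iff_perm (x y : PySem.Dict String Int) (hx : x.keys.Nodup) (hy : y.keys.Nodup) :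
    pvDictEq x y = true ↔ x.items.Perm y.items := by
  constructor
  · intro h
    have h' : PySem.Set.equal x.keys y.keys = true ∧ x.keys.all (fun k => x.get? k == y.get? k) = true := by
      simpa [pvDictEq, Bool.and_eq_true] using h
    have hmem : ∀ a, a ∈ x.keys ↔ a ∈ y.keys := (PySem.Set.equal_iff _ _).mp h'.1
    have hkeys : x.keys.Perm y.keys := (List.perm_ext_iff_of_nodup hx hy).mpr hmem
    have hget : ∀ k ∈ x.keys, x.get? k = y.get? k := by
      intro k hk
      have := List.all_eq_true.mp h'.2 k hk
      exact eq_of_beq this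
    rw [PySem.Dict.items_eq_map_keys x hx 0, PySem.Dict.items_eq_map_keys y hy 0]
    have hmapeq : x.keys.map (fun k => (k, x.getD k 0)) = x.keys.map (fun k => (k, y.getD k 0)) := by
      apply List.map_congr_left
      intro k hk
      have := hget k hk
      simp [PySem.Dict.getD_eq_get?_getD, this]
    rw [hmapeq]
    exact hkeys.map _
  · intro h
    have hkeys : x.keys.Perm y.keys := by
      simpa only [PySem.Dict.keys] using h.map Prod.fst
    have hmem : ∀ a, a ∈ x.keys ↔ a ∈ y.keys := fun a => hkeys.mem_iff
    have hget : ∀ k ∈ x.keys, x.get? k == y.get? k := by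
      intro k hk
      have hk' : k ∈ x.items.map Prod.fst := by simpa only [PySem.Dict.keys] using hk
      obtain ⟨⟨k', v⟩, hmemi, hfst⟩ := List.mem_map.mp hk'
      cases hfst
      have h1 : x.get? k' = some v := PySem.Dict.get?_of_mem_items x hmemi hx
      have h2 : y.get? k' = some v := PySem.Dict.get?_of_mem_items y (h.mem_iff.mp hmemi) hy
      simp [h1, h2]
    simp only [pvDictEq, Bool.and_eq_true]
    exact ⟨(PySem.Set.equal_iff _ _).mpr hmem, List.all_eq_true.mpr hget⟩

-- two permuted lists of pairs with distinct first components sort (by first component) identically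
theorem pvSorted_eq_of_perm (xs ys : List (String × Int)) (h : xs.Perm ys)
    (hx : (xs.map Prod.fst).Nodup) :
    PySem.List.sorted xs (fun kv => kv.1) = PySem.List.sorted ys (fun kv => kv.1) := by
  have h1 : (PySem.List.sorted xs (fun kv => kv.1) false).Perm ys :=
    (PySem.List.sorted_perm xs (fun kv => kv.1) false).trans h
  have hle := PySem.List.sorted_pairwise xs (fun kv => kv.1)
  have hperm : (PySem.List.sorted xs (fun kv => kv.1) false).Perm xs :=
    PySem.List.sorted_perm xs (fun kv => kv.1) false
  have hnd : ((PySem.List.sorted xs (fun kv => kv.1) false).map Prod.fst).Nodup :=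
    (hperm.map Prod.fst).nodup_iff.mpr hx
  have hne : (PySem.List.sorted xs (fun kv => kv.1) false).Pairwise (fun a b => a.1 ≠ b.1) :=
    (List.pairwise_map).mp hnd
  have h2 : (PySem.List.sorted xs (fun kv => kv.1) false).Pairwise (fun a b => a.1 < b.1) :=
    (hle.and hne).imp (fun hab => lt_of_le_of_ne hab.1 hab.2)
  exact (PySem.List.sorted_eq_of_perm_of_pairwise_lt ys (PySem.List.sorted xs (fun kv => kv.1) false) (fun kv => kv.1) h1 h2).symm

-- dict equality of two clocks ↔ equal canonical signatures
theorem pvDictEq_iff_canon (c d : List (String × Int)) :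
    pvDictEq (PySem.Dict.ofList c) (PySem.Dict.ofList d) = true ↔ pvCanon c = pvCanon d := by
  have hc := PySem.Dict.nodup_keys_ofList c
  have hd := PySem.Dict.nodup_keys_ofList d
  have hndc : ((PySem.Dict.ofList c).items.map Prod.fst).Nodup := by
    simpa only [PySem.Dict.keys] using hc
  constructor
  · intro h
    exact pvSorted_eq_of_perm _ _ ((pvDictEq_iff_perm _ _ hc hd).mp h) hndc
  · intro h
    unfold pvCanon at h
    have hp1 := PySem.List.sorted_perm (PySem.Dict.ofList c).items (fun kv => kv.1) false
    have hp2 := PySem.List.sorted_perm (PySem.Dict.ofList d).items (fun kv => kv.1) false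
    exact (pvDictEq_iff_perm _ _ hc hd).mpr (hp1.symm.trans (h ▸ hp2))

-- a deduplicated list x :: l has at most one distinct element iff every element equals the head
theorem pvSetLen_le_one_iff {α : Type} [BEq α] [LawfulBEq α] (x : α) (l : List α) :
    (PySem.Set.ofList (x :: l)).length ≤ 1 ↔ ∀ y ∈ l, y = x := by
  have hx : x ∈ PySem.Set.ofList (x :: l) := (PySem.Set.mem_ofList _ _).mpr (List.mem_cons_self)
  have hnd : (PySem.Set.ofList (x :: l)).Nodup := PySem.Set.nodup_ofList _
  constructor
  · intro h y hy
    have hyy : y ∈ PySem.Set.ofList (x :: l) :=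
      (PySem.Set.mem_ofList _ _).mpr (List.mem_cons_of_mem _ hy)
    match hs : PySem.Set.ofList (x :: l) with
    | [] => rw [hs] at hx; cases hx
    | [a] =>
      rw [hs] at hx hyy
      simp only [List.mem_singleton] at hx hyy
      rw [hyy, hx]
    | a :: b :: t =>
      rw [hs] at h; simp at h
  · intro h
    match hs : PySem.Set.ofList (x :: l) with
    | [] => simp
    | [a] => simp
    | a :: b :: t =>
      exfalso
      have ha : a ∈ PySem.Set.ofList (x :: l) := by rw [hs]; simp
      have hb : b ∈ PySem.Set.ofList (x :: l) := by rw [hs]; simp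
      have hax : a = x := by
        rcases List.mem_cons.mp ((PySem.Set.mem_ofList _ _).mp ha) with h' | h'
        · exact h'
        · exact h a h'
      have hbx : b = x := by
        rcases List.mem_cons.mp ((PySem.Set.mem_ofList _ _).mp hb) with h' | h'
        · exact h'
        · exact h b h'
      rw [hs] at hnd
      exact (List.nodup_cons.mp hnd).1 (by rw [hax, hbx]; exact List.mem_cons_self)

-- the core identity, stated over an arbitrary items list
theorem pvMain (l : List (String × List (String × Int))) :
    (match l with
      | [] => true
      | (_, c) :: t => pvLoopA (PySem.Dict.ofList c) t)
    = decide ((PySem.Set.ofList (List.map pvCanon (List.map (fun x => x.2) l))).length ≤ 1) := by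
  cases l with
  | nil => rfl
  | cons p t =>
    obtain ⟨n, c⟩ := p
    show pvLoopA (PySem.Dict.ofList c) t = _
    rw [pvLoopA_eq_all]
    rw [Bool.eq_iff_iff]
    simp only [List.all_eq_true, List.map_cons, decide_eq_true_eq]
    rw [pvSetLen_le_one_iff]
    constructor
    · intro h y hy
      obtain ⟨q, hq, rfl⟩ := List.mem_map.mp hy
      obtain ⟨q', hq', hsnd⟩ := List.mem_map.mp hq
      subst hsnd
      exact (pvDictEq_iff_canon _ _).mp (h q' hq')
    · intro h q hq
      apply (pvDictEq_iff_canon _ _).mpr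
      exact h (pvCanon q.2) (List.mem_map.mpr ⟨q.2, List.mem_map.mpr ⟨q, hq, rfl⟩, rfl⟩)

-- ===== VERDICT (by name: the statement is the Claim_ definition above) =====
theorem check_strong_consistency_py_spec : Claim_equal_check_strong_consistency_py := by
  intro key ncs _
  unfold Spec_check_strong_consistency_py
  unfold check_strong_consistency_py check_strong_consistency_py_alt
  simp only [PySem.Dict.values]
  exact pvMain (PySem.Dict.ofList ncs).items
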